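-- pv_equiv track=rewrite | github.com/CentOS/sync2git | rpmvercmp.py | _nextSlice
-- ===== SOURCE A (Python) =====
-- conf_tilde = True
--
-- conf_caret = True
--
-- _vT_NUM = 1
--
-- _vT_ALP = 2
--
-- _vT_TIL = 3
--
-- _vT_CAR = 4
--
-- _vT_MSC = 99
--
-- _vT_END = 999
--
-- def _getTByte(d):
--     if False: pass
--     elif d >= '0' and d <= '9':
--         return _vT_NUM
--     elif d >= 'a' and d <= 'z':
--         return _vT_ALP
--     elif d >= 'A' and d <= 'Z':
--         return _vT_ALP
--     elif d == '~':
--         if conf_tilde: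
--             return _vT_TIL
--     elif d == '^':
--         if conf_caret:
--             return _vT_CAR
--     return _vT_MSC
--
-- def _nextSlice(d):
--     if len(d) <= 0:
--         return d, _vT_END, d
--
--     t = _getTByte(d[0])
--
--     for num in range(1, len(d)):
--         if _getTByte(d[num]) != t:
--             return d[:num], t, d[num:]
--
--     return d, t, ""
-- ===== SOURCE B (Python) =====
-- # B: span decomposition — a helper collects the leading same-type run as a list of
-- # characters; the split positions are derived from the run, not from an indexed scan.
--
-- conf_tilde = True
--
-- conf_caret = True
--
-- _vT_NUM = 1
--
-- _vT_ALP = 2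
--
-- _vT_TIL = 3
--
-- _vT_CAR = 4
--
-- _vT_MSC = 99
--
-- _vT_END = 999
--
-- def _getTByte(d):
--     if False: pass
--     elif d >= '0' and d <= '9':
--         return _vT_NUM
--     elif d >= 'a' and d <= 'z':
--         return _vT_ALP
--     elif d >= 'A' and d <= 'Z':
--         return _vT_ALP
--     elif d == '~':
--         if conf_tilde:
--             return _vT_TIL
--     elif d == '^':
--         if conf_caret:
--             return _vT_CAR
--     return _vT_MSC
--
-- def _span(t, s):
--     out = []
--     for ch in s:
--         if _getTByte(ch) != t:
--             break
--         out.append(ch)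
--     return "".join(out)
--
-- def _nextSlice(d):
--     if not d:
--         return d, _vT_END, d
--     t = _getTByte(d[0])
--     head = _span(t, d)
--     return head, t, d[len(head):]
-- ===== Notes on version B (the rewrite author's own statement) =====
-- stated objective: alternative
-- what changed: Replaces the indexed for-range scan with early return of slices by a span helper that accumulates the leading same-type run character by character, the split being derived from the run's length.
import Mathlib
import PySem

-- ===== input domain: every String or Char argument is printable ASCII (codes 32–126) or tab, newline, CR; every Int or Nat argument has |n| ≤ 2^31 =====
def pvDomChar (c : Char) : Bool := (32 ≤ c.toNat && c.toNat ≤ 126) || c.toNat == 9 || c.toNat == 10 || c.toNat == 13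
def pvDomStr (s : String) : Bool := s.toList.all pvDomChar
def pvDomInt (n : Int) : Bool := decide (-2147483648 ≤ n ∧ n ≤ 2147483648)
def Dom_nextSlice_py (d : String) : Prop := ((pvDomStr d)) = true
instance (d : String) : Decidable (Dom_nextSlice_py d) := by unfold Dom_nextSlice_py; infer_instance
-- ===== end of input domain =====

-- B replaces A's indexed scan-with-early-return by a recursive span helper peeling off
-- the leading same-type run (objective: alternative decomposition, not faster).


-- ===== PORT A =====
def conf_tilde : Bool := true
def conf_caret : Bool := true
def vT_NUM : Int := 1
def vT_ALP : Int := 2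
def vT_TIL : Int := 3
def vT_CAR : Int := 4
def vT_MSC : Int := 99
def vT_END : Int := 999

-- _getTByte: branch order as in Python; the '~'/'^' branches fall through to _vT_MSC
-- when their conf flag is false, exactly as the Python does.
def getTByte (d : Char) : Int :=
  if '0' ≤ d ∧ d ≤ '9' then vT_NUM
  else if 'a' ≤ d ∧ d ≤ 'z' then vT_ALP
  else if 'A' ≤ d ∧ d ≤ 'Z' then vT_ALP
  else if d = '~' then (if conf_tilde then vT_TIL else vT_MSC)
  else if d = '^' then (if conf_caret then vT_CAR else vT_MSC)
  else vT_MSC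

-- the 'for num in range(1, len(d))' loop with its early return: some num = the early
-- return's index, none = the loop ran out
def nextSliceLoopA (cs : List Char) (t : Int) (num : Nat) : Option Nat :=
  if h : num < cs.length then
    if getTByte cs[num] ≠ t then some num
    else nextSliceLoopA cs t (num + 1)
  else none
termination_by cs.length - num

def nextSlice_py (d : String) : String × Int × String :=
  if PySem.Str.len d ≤ 0 then (d, vT_END, d)
  else
    -- d[0]: d is nonempty in this branch, so the default is never used (exact)
    let t := getTByte (PySem.List.pyGetD d.toList 0 ' ')
    match nextSliceLoopA d.toList t 1 with
    | some num => (PySem.Str.slice d none (some (num : Int)), t, PySem.Str.slice d (some (num : Int)) none)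
    | none => (d, t, "")

-- ===== PORT B =====
-- _span's for-loop with break: accumulate the leading run's characters (out.append → ++ [c])
def spanLoopB (t : Int) (s : List Char) (out : List Char) : List Char :=
  match s with
  | [] => out
  | c :: rest => if getTByte c ≠ t then out else spanLoopB t rest (out ++ [c])

-- _span: "".join(out) on the accumulated run
def spanB (t : Int) (s : List Char) : List Char := spanLoopB t s []

def nextSlice_py_alt (d : String) : String × Int × String :=
  match d.toList with
  | [] => (d, vT_END, d)
  | c :: _ =>
    let t := getTByte c
    let head := spanB t d.toList
    (String.ofList head, t, PySem.Str.slice d (some (head.length : Int)) none)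

-- ===== PRECONDITION & SPEC =====
def Spec_nextSlice_py (d : String) (out : String × Int × String) : Prop := out = nextSlice_py_alt d
instance (d : String) (out : String × Int × String) : Decidable (Spec_nextSlice_py d out) := by unfold Spec_nextSlice_py; infer_instance

-- ===== CLAIM (what is proved, stated in full; the proofs are below) =====
def Claim_equal_nextSlice_py : Prop := ∀ (d : String), Dom_nextSlice_py d → Spec_nextSlice_py d (nextSlice_py d)

-- ===== LEMMAS AND PROOFS =====

theorem spanLoopB_eq (t : Int) (s : List Char) (out : List Char) :
    spanLoopB t s out = out ++ s.takeWhile (fun c => getTByte c == t) := by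
  induction s generalizing out with
  | nil => simp [spanLoopB]
  | cons c rest ih =>
      simp only [spanLoopB, List.takeWhile_cons]
      by_cases h : getTByte c = t <;> simp [h, ih]

theorem spanB_eq_takeWhile (t : Int) (s : List Char) :
    spanB t s = s.takeWhile (fun c => getTByte c == t) := by
  simp [spanB, spanLoopB_eq]

theorem takeWhile_eq_take (p : Char → Bool) (s : List Char) :
    s.takeWhile p = s.take (s.takeWhile p).length := by
  induction s with
  | nil => rfl
  | cons c rest ih =>
      by_cases h : p c <;> simp [h, ih.symm]

theorem nextSliceLoopA_spec (cs : List Char) (t : Int) (k : Nat) :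
    nextSliceLoopA cs t k =
      (if (cs.drop k).takeWhile (fun c => getTByte c == t) = cs.drop k then none
       else some (k + ((cs.drop k).takeWhile (fun c => getTByte c == t)).length)) := by
  by_cases h : k < cs.length
  · have hd : cs.drop k = cs[k] :: cs.drop (k + 1) := by
      rw [List.drop_eq_getElem_cons h]
    by_cases ht : getTByte cs[k] = t
    · have hbeq : (getTByte cs[k] == t) = true := by simp [ht]
      rw [nextSliceLoopA, dif_pos h, if_neg (by simp [ht]),
        nextSliceLoopA_spec cs t (k + 1), hd]
      simp only [List.takeWhile_cons, hbeq, if_true, List.cons.injEq, true_and,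
        List.length_cons]
      split_ifs with h2
      · rfl
      · congr 1; omega
    · rw [nextSliceLoopA, dif_pos h, if_pos ht]
      have h0 : (cs.drop k).takeWhile (fun c => getTByte c == t) = [] := by
        rw [hd]; simp [ht]
      have hne : ¬ ((cs.drop k).takeWhile (fun c => getTByte c == t) = cs.drop k) := by
        rw [h0]
        intro hc
        rw [hd] at hc
        exact absurd hc.symm (List.cons_ne_nil _ _)
      rw [if_neg hne, h0]
      simp
  · rw [nextSliceLoopA]
    have : cs.drop k = [] := List.drop_eq_nil_of_le (by omega)
    simp [h, this]
termination_by cs.length - k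

theorem string_eq_of_toList_eq {s t : String} (h : s.toList = t.toList) : s = t := by
  have := congrArg String.ofList h
  simpa [String.ofList_toList] using this

theorem nextSlice_py_eq (d : String) : nextSlice_py d = nextSlice_py_alt d := by
  rcases hcs : d.toList with _ | ⟨c, rest⟩
  · -- empty string
    have hlen : PySem.Str.len d ≤ 0 := by
      rw [PySem.Str.len_eq, hcs]; simp
    simp [nextSlice_py, nextSlice_py_alt, hcs]
  · -- nonempty
    have hlen : ¬ PySem.Str.len d ≤ 0 := by
      rw [PySem.Str.len_eq, hcs]; simp
    have hget : PySem.List.pyGetD (c :: rest) 0 ' ' = c := by simp [pysem]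
    have hhead : spanB (getTByte c) (c :: rest)
        = c :: rest.takeWhile (fun x => getTByte x == getTByte c) := by
      rw [spanB_eq_takeWhile]
      simp
    have hloop := nextSliceLoopA_spec (c :: rest) (getTByte c) 1
    simp only [List.drop_succ_cons, List.drop_zero] at hloop
    simp only [nextSlice_py, nextSlice_py_alt, hcs, if_neg hlen, hget]
    by_cases hall : rest.takeWhile (fun x => getTByte x == getTByte c) = rest
    · -- loop exhausts: A returns (d, t, "")
      rw [hloop, if_pos hall]
      refine Prod.ext ?_ (Prod.ext rfl ?_)
      · apply string_eq_of_toList_eq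
        rw [String.toList_ofList, hhead, hall, hcs]
      · apply string_eq_of_toList_eq
        have hlenhead : (spanB (getTByte c) (c :: rest)).length = (c :: rest).length := by
          rw [hhead, hall]
        rw [PySem.Str.toList_slice]
        simp only [PySem.Chars.slice_eq_listSlice, hcs, hlenhead]
        rw [PySem.List.slice_from_natCast]
        simp
    · -- early return at num = 1 + |takeWhile rest|
      rw [hloop, if_neg hall]
      refine Prod.ext ?_ (Prod.ext rfl ?_)
      · apply string_eq_of_toList_eq
        rw [PySem.Str.toList_slice]
        simp only [PySem.Chars.slice_eq_listSlice, PySem.List.slice_to_natCast]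
        rw [hhead, hcs, String.toList_ofList,
          Nat.add_comm 1 _, List.take_succ_cons,
          ← takeWhile_eq_take (fun x => getTByte x == getTByte c) rest]
      · apply string_eq_of_toList_eq
        rw [PySem.Str.toList_slice, PySem.Str.toList_slice]
        simp only [PySem.Chars.slice_eq_listSlice, PySem.List.slice_from_natCast]
        congr 1
        rw [hhead]
        simp [Nat.add_comm]

-- ===== VERDICT (by name: the statement is the Claim_ definition above) =====
theorem nextSlice_py_spec : Claim_equal_nextSlice_py := by
  intro d _
  unfold Spec_nextSlice_py
  exact nextSlice_py_eq d
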